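-- pv_equiv track=rewrite | github.com/eleabil/Algorithmization | Lab5/fantz.py | create_array_of_binary_powers
-- ===== SOURCE A (Python) =====
-- def create_array_of_binary_powers(n, input_string):
--     power = 0
--     binary_power = ''
--     list_of_powers = []
--
--     while len(binary_power) <= len(input_string):
--         powered_number = pow(n, power)
--         binary_power = bin(powered_number)[2:]
--         list_of_powers.append(binary_power)
--         for i in list_of_powers:
--             if len(i) > len(input_string):
--                 list_of_powers.remove(i)
--         power += 1
--
--     return list_of_powers
-- ===== SOURCE B (Python) =====
-- def create_array_of_binary_powers(n, input_string):
--     limit = len(input_string)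
--     list_of_powers = []
--     value = 1
--     while True:
--         binary = bin(value)[2:]
--         if len(binary) > limit:
--             return list_of_powers
--         list_of_powers.append(binary)
--         value *= n
-- ===== Notes on version B (the rewrite author's own statement) =====
-- stated objective: simpler
-- what changed: B replaces A's recompute-pow(n,power)-from-scratch-each-iteration plus append-then-prune (an inner remove-during-iteration pass over the whole list every outer step) by a single loop that keeps a running value multiplied by n each step and tests the binary string's length once before appending, breaking at the first string that does not fit; the inner filter pass disappears entirely.
import Mathlib
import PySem

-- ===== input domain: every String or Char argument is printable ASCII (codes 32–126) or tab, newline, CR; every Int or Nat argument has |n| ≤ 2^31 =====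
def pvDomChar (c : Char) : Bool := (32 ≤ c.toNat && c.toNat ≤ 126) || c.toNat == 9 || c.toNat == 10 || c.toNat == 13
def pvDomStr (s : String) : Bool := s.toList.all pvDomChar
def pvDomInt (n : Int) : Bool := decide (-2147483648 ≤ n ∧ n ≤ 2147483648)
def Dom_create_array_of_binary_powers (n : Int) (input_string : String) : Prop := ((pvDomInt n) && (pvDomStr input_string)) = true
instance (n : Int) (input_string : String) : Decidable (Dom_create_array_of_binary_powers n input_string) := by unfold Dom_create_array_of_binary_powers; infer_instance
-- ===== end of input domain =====

-- B drops A's per-iteration remove-during-iteration prune pass and its pow(n, power) recomputation: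
-- one loop with a running value, length-tested once before appending (objective: simpler).

-- ===== PORT A =====
-- bin(x)[2:]  (PySem.Int.pyBin is Python's bin(); slicing off '0b' leaves Python's 'b101' form for negatives)
def pvBin2 (x : Int) : String := PySem.Str.slice (PySem.Int.pyBin x) (some 2) none

-- Python's `for i in list_of_powers: if len(i) > L: list_of_powers.remove(i)`:
-- the for-iterator keeps an index i advancing by 1 each step over the mutating list;
-- list.remove drops the first occurrence (always present here, so getD is exact).
-- gas = the list's length bounds the remaining steps (the list never grows), making the loop structural.
def pvRemovePass (L : Int) : Nat → Nat → List String → List String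
  | 0, _, xs => xs
  | gas+1, i, xs =>
    if h : i < xs.length then
      let x := xs[i]
      if PySem.Str.len x > L then
        pvRemovePass L gas (i+1) ((PySem.List.remove? xs x).getD xs)
      else
        pvRemovePass L gas (i+1) xs
    else xs

-- A's while loop; the fuel only makes the (for n ∈ {-1,0,1} possibly non-terminating) loop
-- total — the proof shows it is never exhausted on Pre_.
def pvALoop (n : Int) (L : Int) : Nat → Nat → String → List String → List String
  | 0, _, _, acc => acc
  | fuel+1, power, binary_power, acc =>
    if PySem.Str.len binary_power ≤ L then
      pvALoop n L fuel (power+1) (pvBin2 (n ^ power))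
        (pvRemovePass L (acc ++ [pvBin2 (n ^ power)]).length 0 (acc ++ [pvBin2 (n ^ power)]))
    else acc

def create_array_of_binary_powers (n : Int) (input_string : String) : List String :=
  pvALoop n (PySem.Str.len input_string) (input_string.toList.length + 2) 0 "" []

-- ===== PORT B =====
-- B's while loop: running value, one length test, no prune pass (fuel as above)
def pvBLoop (n : Int) (L : Int) : Nat → Int → List String → List String
  | 0, _, acc => acc
  | fuel+1, value, acc =>
    if PySem.Str.len (pvBin2 value) > L then acc
    else pvBLoop n L fuel (value * n) (acc ++ [pvBin2 value])

def create_array_of_binary_powers_alt (n : Int) (input_string : String) : List String :=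
  pvBLoop n (PySem.Str.len input_string) (input_string.toList.length + 1) 1 []

-- ===== PRECONDITION & SPEC =====
-- Pre_ is exactly where the Python A terminates (B loops forever on the same inputs): for |n| ≥ 2
-- always; for n = -1 only when len(input_string) ≤ 1; for n ∈ {0,1} only when input_string is empty.
def Pre_create_array_of_binary_powers (n : Int) (input_string : String) : Prop :=
  2 ≤ n.natAbs ∨ (n = -1 ∧ input_string.toList.length ≤ 1) ∨
    ((n = 0 ∨ n = 1) ∧ input_string.toList.length = 0)
instance (n : Int) (input_string : String) : Decidable (Pre_create_array_of_binary_powers n input_string) := by unfold Pre_create_array_of_binary_powers; infer_instance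

def pvWitness_create_array_of_binary_powers : Int × String := (3, "abcde")

def Spec_create_array_of_binary_powers (n : Int) (input_string : String) (out : List String) : Prop := out = create_array_of_binary_powers_alt n input_string
instance (n : Int) (input_string : String) (out : List String) : Decidable (Spec_create_array_of_binary_powers n input_string out) := by unfold Spec_create_array_of_binary_powers; infer_instance

-- ===== CLAIM (what is proved, stated in full; the proofs are below) =====
def Claim_equal_create_array_of_binary_powers : Prop := ∀ (n : Int) (input_string : String), Dom_create_array_of_binary_powers n input_string → Pre_create_array_of_binary_powers n input_string → Spec_create_array_of_binary_powers n input_string (create_array_of_binary_powers n input_string)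

-- ===== LEMMAS AND PROOFS =====

-- the character list behind bin(x)[2:]
lemma pvBin2_toList (x : Int) :
    (pvBin2 x).toList = if x < 0 then 'b' :: Nat.toDigits 2 x.natAbs else Nat.toDigits 2 x.toNat := by
  rw [pvBin2, PySem.Str.toList_slice, PySem.Int.toList_pyBin]
  simp only [pysem]
  unfold PySem.Int.toBinChars0b
  split <;> · rw [show ((2:Int)) = ((2:Nat):Int) by norm_num, PySem.List.slice_from_natCast]; rfl

-- once the index has passed the end, the pass is the identity
lemma pvRemovePass_stop (L : Int) (gas i : Nat) (xs : List String) (h : xs.length ≤ i) :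
    pvRemovePass L gas i xs = xs := by
  cases gas with
  | zero => rfl
  | succ g => unfold pvRemovePass; rw [dif_neg (by omega)]

-- the pass over ys ++ rest ++ [y] with everything before y fitting removes at most y
lemma pvRemovePass_aux (L : Int) (rest : List String) :
    ∀ (gas : Nat) (ys : List String) (y : String),
      rest.length < gas →
      (∀ x ∈ ys, PySem.Str.len x ≤ L) →
      (∀ x ∈ rest, PySem.Str.len x ≤ L) →
      pvRemovePass L gas ys.length (ys ++ rest ++ [y]) =
        ys ++ rest ++ (if PySem.Str.len y ≤ L then [y] else []) := by
  induction rest with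
  | nil =>
    intro gas ys y hgas hys _
    obtain ⟨g, rfl⟩ : ∃ g, gas = g + 1 := ⟨gas - 1, by omega⟩
    unfold pvRemovePass
    have hlen : ys.length < (ys ++ [] ++ [y]).length := by simp
    rw [dif_pos hlen]
    have hget : (ys ++ [] ++ [y])[ys.length]'hlen = y := by simp
    simp only [hget]
    by_cases hy : PySem.Str.len y ≤ L
    · rw [if_neg (not_lt.2 hy)]
      rw [pvRemovePass_stop _ _ _ _ (by simp)]
      rw [if_pos hy]
    · rw [if_pos (lt_of_not_ge hy)]
      have hymem : y ∈ ys ++ [] ++ [y] := by simp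
      have hynotys : y ∉ ys := fun hmem => hy (hys y hmem)
      rw [PySem.List.remove?_eq_some_erase _ y hymem]
      have herase : (ys ++ [] ++ [y]).erase y = ys := by
        simp only [List.append_nil]
        rw [List.erase_append_right _ hynotys]
        simp
      rw [herase]
      simp only [Option.getD_some]
      rw [pvRemovePass_stop _ _ _ _ (by omega)]
      rw [if_neg hy]
      simp
  | cons r rest ih =>
    intro gas ys y hgas hys hrest
    obtain ⟨g, rfl⟩ : ∃ g, gas = g + 1 := ⟨gas - 1, by omega⟩
    unfold pvRemovePass
    have hlen : ys.length < (ys ++ r :: rest ++ [y]).length := by simp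
    rw [dif_pos hlen]
    have hget : (ys ++ r :: rest ++ [y])[ys.length]'hlen = r := by
      simp [List.getElem_append_right]
    simp only [hget]
    rw [if_neg (not_lt.2 (hrest r (by simp)))]
    have hcast : ys ++ r :: rest ++ [y] = (ys ++ [r]) ++ rest ++ [y] := by simp
    have hcast2 : ys.length + 1 = (ys ++ [r]).length := by simp
    have hg : rest.length < g := by simp at hgas; omega
    rw [hcast, hcast2, ih g (ys ++ [r]) y hg
      (by intro z hz
          rcases List.mem_append.1 hz with h | h
          · exact hys z h
          · simp only [List.mem_singleton] at h; exact h ▸ hrest r (by simp))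
      (fun z hz => hrest z (by simp [hz]))]
    simp

-- A's prune pass after the append: keeps acc, keeps y iff it fits
lemma pvRemovePass_app (L : Int) (acc : List String) (y : String)
    (hacc : ∀ x ∈ acc, PySem.Str.len x ≤ L) :
    pvRemovePass L (acc ++ [y]).length 0 (acc ++ [y]) =
      acc ++ (if PySem.Str.len y ≤ L then [y] else []) := by
  have h := pvRemovePass_aux L acc (acc.length + 1) [] y (by simp) (by simp) hacc
  simpa using h

-- main alignment: with the witness that some power within fuel no longer fits,
-- A's loop (one unit more fuel) equals B's loop
lemma pvLoop_eq (n : Int) (L : Int) :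
    ∀ (fuel power : Nat) (bp : String) (acc : List String),
      (∀ x ∈ acc, PySem.Str.len x ≤ L) →
      PySem.Str.len bp ≤ L →
      (∃ k, k < fuel ∧ PySem.Str.len (pvBin2 (n ^ (power + k))) > L) →
      pvALoop n L (fuel + 1) power bp acc = pvBLoop n L fuel (n ^ power) acc := by
  intro fuel
  induction fuel with
  | zero => rintro power bp acc _ _ ⟨k, hk, _⟩; omega
  | succ f ih =>
    intro power bp acc hacc hbp ⟨k, hk, hbad⟩
    rw [pvALoop, if_pos hbp]
    rw [pvRemovePass_app L acc (pvBin2 (n ^ power)) hacc]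
    by_cases hs : PySem.Str.len (pvBin2 (n ^ power)) ≤ L
    · rw [if_pos hs]
      have hk0 : k ≠ 0 := by
        intro h; subst h; rw [Nat.add_zero] at hbad; exact absurd hbad (not_lt.2 hs)
      have hih := ih (power + 1) (pvBin2 (n ^ power)) (acc ++ [pvBin2 (n ^ power)])
        (by intro z hz
            rcases List.mem_append.1 hz with h | h
            · exact hacc z h
            · simp only [List.mem_singleton] at h; exact h ▸ hs)
        hs
        ⟨k - 1, by omega, by
          have heq : power + 1 + (k - 1) = power + k := by omega
          rw [heq]; exact hbad⟩
      rw [hih]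
      rw [pvBLoop, if_neg (not_lt.2 hs)]
      rw [← pow_succ]
    · rw [if_neg hs]
      rw [List.append_nil]
      rw [pvALoop, if_neg hs]
      rw [pvBLoop, if_pos (lt_of_not_ge hs)]

-- digit-length lower bound: |n| ≥ 2 → bin(n^p)[2:] has more than p characters
lemma pvBin2_len_ge (n : Int) (hn : 2 ≤ n.natAbs) (p : Nat) :
    p < (pvBin2 (n ^ p)).toList.length := by
  have hm : 2 ^ p ≤ (n ^ p).natAbs := by
    rw [Int.natAbs_pow]
    exact Nat.pow_le_pow_left hn p
  have hcore : p < (Nat.toDigits 2 (n ^ p).natAbs).length := by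
    rcases Nat.eq_zero_or_pos p with hp | hp
    · subst hp; exact Nat.length_toDigits_pos
    · by_contra hle
      push Not at hle
      have := (Nat.length_toDigits_le_iff (by norm_num) hp).1 hle
      omega
  rw [pvBin2_toList]
  split
  · simp only [List.length_cons]; omega
  · rename_i hnn
    rw [show (n ^ p).toNat = (n ^ p).natAbs by omega]
    exact hcore

-- ===== VERDICT (by name: the statement is the Claim_ definition above) =====
theorem create_array_of_binary_powers_spec : Claim_equal_create_array_of_binary_powers := by
  intro n s _hdom hpre
  unfold Spec_create_array_of_binary_powers create_array_of_binary_powers create_array_of_binary_powers_alt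
  have hL : PySem.Str.len s = (s.toList.length : Int) := PySem.Str.len_eq s
  have hwit : ∃ k, k < s.toList.length + 1 ∧
      PySem.Str.len (pvBin2 (n ^ (0 + k))) > PySem.Str.len s := by
    rcases hpre with hA | ⟨hn, hs⟩ | ⟨hn, hs⟩
    · refine ⟨s.toList.length, by omega, ?_⟩
      rw [hL, PySem.Str.len_eq, Nat.zero_add]
      exact_mod_cast pvBin2_len_ge n hA s.toList.length
    · subst hn
      have h01 : s.toList.length = 0 ∨ s.toList.length = 1 := by omega
      rcases h01 with h0 | h1
      · exact ⟨0, by omega, by rw [hL, h0, PySem.Str.len_eq]; norm_num [pvBin2_toList]; decide⟩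
      · refine ⟨1, by omega, ?_⟩
        rw [hL, h1, PySem.Str.len_eq]
        norm_num [pvBin2_toList]
        decide
    · rcases hn with rfl | rfl <;>
      · exact ⟨0, by omega, by rw [hL, hs, PySem.Str.len_eq]; norm_num [pvBin2_toList]; decide⟩
  have h := pvLoop_eq n (PySem.Str.len s) (s.toList.length + 1) 0 "" []
    (by simp) (by rw [hL]; simp [PySem.Str.len_eq]) hwit
  rw [pow_zero] at h
  exact h
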